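-- pv_equiv track=rewrite | github.com/daniel-reich/turbo-robot | zp64GNJQpZyGpYWL8_6.py | score_it
-- ===== SOURCE A (Python) =====
-- def score_it(s):
--   t = 0
--   nl = 0
--   ns = ''
--   for c in s:
--     if(c == '('):
--       if(ns != ''):
--         t += int(ns) * nl
--         ns = ''
--       nl += 1
--     elif(c == ')'):
--       if(ns != ''):
--           t += int(ns) * nl
--           ns = ''
--       nl -= 1
--     elif(ord(c) >= 48 and ord(c) <= 57):
--       ns += c
--   return t
-- ===== SOURCE B (Python) =====
-- def score_it(s):
--     # Pass 1: tokenize into digit-group value tokens and paren depth-delta tokens.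
--     tokens = []
--     group = None
--     for c in s:
--         if '0' <= c <= '9':
--             group = (group or 0) * 10 + (ord(c) - 48)
--         elif c == '(' or c == ')':
--             if group is not None:
--                 tokens.append(('n', group))
--                 group = None
--             tokens.append(('d', 1 if c == '(' else -1))
--     # A trailing group never followed by a parenthesis is dropped.
--     # Pass 2: fold over the token list tracking the nesting depth.
--     total = 0
--     depth = 0
--     for kind, v in tokens:
--         if kind == 'd':
--             depth += v
--         else:
--             total += v * depth
--     return total
-- ===== Notes on version B (the rewrite author's own statement) =====
-- stated objective: alternative
-- what changed: Replaced A's single pass with a string accumulator and int() re-parsing by a two-phase design: pass 1 tokenizes the input into digit-group values (accumulated arithmetically) and paren depth-delta tokens, pass 2 folds depth and total over the token list.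
import Mathlib
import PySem

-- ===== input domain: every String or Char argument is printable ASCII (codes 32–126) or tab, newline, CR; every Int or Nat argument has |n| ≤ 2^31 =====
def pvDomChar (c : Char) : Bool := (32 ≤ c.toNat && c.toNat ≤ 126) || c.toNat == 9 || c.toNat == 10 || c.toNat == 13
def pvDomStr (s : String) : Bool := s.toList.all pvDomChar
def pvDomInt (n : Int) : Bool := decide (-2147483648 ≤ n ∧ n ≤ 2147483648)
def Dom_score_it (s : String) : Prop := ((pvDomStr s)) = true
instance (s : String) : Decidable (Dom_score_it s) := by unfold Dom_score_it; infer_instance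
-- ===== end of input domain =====

-- B replaces A's single pass (string accumulator + int() re-parse at each flush) by a
-- tokenize-then-fold two-phase design of the same cost (objective: alternative).

-- ===== PORT A =====
-- int(ns) for a nonempty ASCII-digit string ns (A only ever calls int on such strings): exact there.
def digitsVal (ns : List Char) : Int :=
  ns.foldl (fun a c => a * 10 + ((c.toNat : Int) - 48)) 0

def stepA (st : Int × Int × List Char) (c : Char) : Int × Int × List Char :=
  let (t, nl, ns) := st
  if c = '(' then
    if ns ≠ [] then (t + digitsVal ns * nl, nl + 1, []) else (t, nl + 1, ns)
  else if c = ')' then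
    if ns ≠ [] then (t + digitsVal ns * nl, nl - 1, []) else (t, nl - 1, ns)
  else if 48 ≤ c.toNat ∧ c.toNat ≤ 57 then (t, nl, ns ++ [c])
  else (t, nl, ns)

def score_it (s : String) : Int :=
  (s.toList.foldl stepA (0, 0, [])).1

-- ===== PORT B =====
-- pass 1: token list; a token is ("n", groupValue) or ("d", ±1)
def tokStep (st : List (String × Int) × Option Int) (c : Char) : List (String × Int) × Option Int :=
  let (tokens, group) := st
  if '0' ≤ c ∧ c ≤ '9' then
    (tokens, some ((group.getD 0) * 10 + ((c.toNat : Int) - 48)))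
  else if c = '(' ∨ c = ')' then
    let tokens := match group with
      | some g => tokens ++ [("n", g)]
      | none => tokens
    (tokens ++ [("d", if c = '(' then (1 : Int) else -1)], none)
  else (tokens, group)

-- pass 2: fold depth and total over the tokens
def sumStep (st : Int × Int) (tok : String × Int) : Int × Int :=
  let (total, depth) := st
  if tok.1 = "d" then (total, depth + tok.2) else (total + tok.2 * depth, depth)

def score_it_alt (s : String) : Int :=
  let tokens := (s.toList.foldl tokStep ([], none)).1
  (tokens.foldl sumStep (0, 0)).1

-- ===== PRECONDITION & SPEC =====
def Spec_score_it (s : String) (out : Int) : Prop := out = score_it_alt s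
instance (s : String) (out : Int) : Decidable (Spec_score_it s out) := by unfold Spec_score_it; infer_instance

-- ===== CLAIM (what is proved, stated in full; the proofs are below) =====
def Claim_equal_score_it : Prop := ∀ (s : String), Dom_score_it s → Spec_score_it s (score_it s)

-- ===== LEMMAS AND PROOFS =====

-- B's Char comparison test equals A's ord test
theorem digit_test (c : Char) : ('0' ≤ c ∧ c ≤ '9') ↔ (48 ≤ c.toNat ∧ c.toNat ≤ 57) := by
  constructor
  · rintro ⟨h1, h2⟩
    exact ⟨UInt32.le_iff_toNat_le.mp (Char.le_def.mp h1), UInt32.le_iff_toNat_le.mp (Char.le_def.mp h2)⟩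
  · rintro ⟨h1, h2⟩
    exact ⟨Char.le_def.mpr (UInt32.le_iff_toNat_le.mpr h1), Char.le_def.mpr (UInt32.le_iff_toNat_le.mpr h2)⟩

-- the group accumulator of B corresponds to A's pending digit string
def groupOf (ns : List Char) : Option Int :=
  if ns = [] then none else some (digitsVal ns)

-- step-evaluation lemmas for the three step functions
theorem stepA_open (t nl : Int) (ns : List Char) :
    stepA (t, nl, ns) '(' =
      if ns ≠ [] then (t + digitsVal ns * nl, nl + 1, []) else (t, nl + 1, ns) := by
  simp [stepA]

theorem stepA_close (t nl : Int) (ns : List Char) :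
    stepA (t, nl, ns) ')' =
      if ns ≠ [] then (t + digitsVal ns * nl, nl - 1, []) else (t, nl - 1, ns) := by
  have h : ¬ (')' : Char) = '(' := by decide
  simp [stepA, h]

theorem stepA_digit (t nl : Int) (ns : List Char) {c : Char}
    (h : 48 ≤ c.toNat ∧ c.toNat ≤ 57) :
    stepA (t, nl, ns) c = (t, nl, ns ++ [c]) := by
  have h1 : ¬ c = '(' := by rintro rfl; revert h; decide
  have h2 : ¬ c = ')' := by rintro rfl; revert h; decide
  simp [stepA, h, h1, h2]

theorem stepA_other (t nl : Int) (ns : List Char) {c : Char}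
    (h1 : ¬ c = '(') (h2 : ¬ c = ')') (h3 : ¬ (48 ≤ c.toNat ∧ c.toNat ≤ 57)) :
    stepA (t, nl, ns) c = (t, nl, ns) := by
  simp [stepA, h1, h2, h3]

theorem tokStep_digit (toks : List (String × Int)) (g : Option Int) {c : Char}
    (h : '0' ≤ c ∧ c ≤ '9') :
    tokStep (toks, g) c = (toks, some ((g.getD 0) * 10 + ((c.toNat : Int) - 48))) := by
  simp [tokStep, h]

theorem tokStep_paren_none (toks : List (String × Int)) {c : Char}
    (h1 : ¬ ('0' ≤ c ∧ c ≤ '9')) (h2 : c = '(' ∨ c = ')') :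
    tokStep (toks, none) c =
      (toks ++ [("d", if c = '(' then (1 : Int) else -1)], none) := by
  simp [tokStep, h1, h2]

theorem tokStep_paren_some (toks : List (String × Int)) (gv : Int) {c : Char}
    (h1 : ¬ ('0' ≤ c ∧ c ≤ '9')) (h2 : c = '(' ∨ c = ')') :
    tokStep (toks, some gv) c =
      ((toks ++ [("n", gv)]) ++ [("d", if c = '(' then (1 : Int) else -1)], none) := by
  simp [tokStep, h1, h2]

theorem tokStep_other (toks : List (String × Int)) (g : Option Int) {c : Char}
    (h1 : ¬ ('0' ≤ c ∧ c ≤ '9')) (h2 : ¬ (c = '(' ∨ c = ')')) :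
    tokStep (toks, g) c = (toks, g) := by
  simp [tokStep, h1, h2]

-- the tokens already emitted are a pure prefix of the final token list
theorem tok_prefix (l : List Char) : ∀ (toks : List (String × Int)) (g : Option Int),
    l.foldl tokStep (toks, g)
      = (toks ++ (l.foldl tokStep ([], g)).1, (l.foldl tokStep ([], g)).2) := by
  induction l with
  | nil => intro toks g; simp
  | cons c rest ih =>
    intro toks g
    by_cases hd : '0' ≤ c ∧ c ≤ '9'
    · rw [List.foldl_cons, List.foldl_cons, tokStep_digit _ _ hd, tokStep_digit _ _ hd,
        ih toks]
    · by_cases hp : c = '(' ∨ c = ')'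
      · cases g with
        | none =>
          rw [List.foldl_cons, List.foldl_cons, tokStep_paren_none _ hd hp,
            tokStep_paren_none _ hd hp]
          rw [ih (toks ++ [("d", if c = '(' then (1:Int) else -1)]) none,
            ih ([] ++ [("d", if c = '(' then (1:Int) else -1)]) none]
          simp
        | some gv =>
          rw [List.foldl_cons, List.foldl_cons, tokStep_paren_some _ _ hd hp,
            tokStep_paren_some _ _ hd hp]
          rw [ih ((toks ++ [("n", gv)]) ++ [("d", if c = '(' then (1:Int) else -1)]) none,
            ih (([] ++ [("n", gv)]) ++ [("d", if c = '(' then (1:Int) else -1)]) none]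
          simp
      · rw [List.foldl_cons, List.foldl_cons, tokStep_other _ _ hd hp,
          tokStep_other _ _ hd hp]
        exact ih toks g

theorem sumStep_d (st : Int × Int) {tok : String × Int} (h : tok.1 = "d") :
    sumStep st tok = (st.1, st.2 + tok.2) := by
  simp [sumStep, h]

theorem sumStep_n (st : Int × Int) {tok : String × Int} (h : ¬ tok.1 = "d") :
    sumStep st tok = (st.1 + tok.2 * st.2, st.2) := by
  simp [sumStep, h]

-- the running total is additive in its initial value
theorem sum_shift (toks : List (String × Int)) : ∀ (t0 d : Int),
    toks.foldl sumStep (t0, d)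
      = (t0 + (toks.foldl sumStep (0, d)).1, (toks.foldl sumStep (0, d)).2) := by
  induction toks with
  | nil => intro t0 d; simp
  | cons tok rest ih =>
    intro t0 d
    by_cases h : tok.1 = "d"
    · rw [List.foldl_cons, List.foldl_cons, sumStep_d _ h, sumStep_d _ h, ih t0, ih 0]
    · rw [List.foldl_cons, List.foldl_cons, sumStep_n _ h, sumStep_n _ h]
      rw [ih (t0 + tok.2 * d), ih (0 + tok.2 * d)]
      simp [Prod.ext_iff]
      ring

-- main invariant: A's fold from (t, nl, ns) is t plus pass-2's total over pass-1's
-- tokens when pass 1 starts with pending group groupOf ns and pass 2 at depth nl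
theorem main_lemma (l : List Char) : ∀ (t nl : Int) (ns : List Char),
    (l.foldl stepA (t, nl, ns)).1
      = t + ((l.foldl tokStep ([], groupOf ns)).1.foldl sumStep (0, nl)).1 := by
  induction l with
  | nil => intro t nl ns; simp
  | cons c rest ih =>
    intro t nl ns
    rw [List.foldl_cons, List.foldl_cons]
    by_cases hop : c = '('
    · subst hop
      have hd : ¬ ('0' ≤ '(' ∧ '(' ≤ '9') := by decide
      rw [stepA_open]
      by_cases hns : ns = []
      · subst hns
        rw [if_neg (by simp), show groupOf [] = none from rfl,
          tokStep_paren_none _ hd (Or.inl rfl),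
          show (if '(' = '(' then (1:Int) else -1) = 1 from by decide]
        rw [ih t (nl + 1) [], show groupOf [] = none from rfl,
          tok_prefix rest ([] ++ [("d", (1:Int))]) none, List.foldl_append,
          show ([] ++ [("d", (1:Int))] : List (String × Int)).foldl sumStep ((0:Int), nl)
            = (0, nl + 1) from by simp [sumStep],
          sum_shift ((rest.foldl tokStep ([], none)).1) 0 (nl + 1)]
      · rw [if_pos hns, show groupOf ns = some (digitsVal ns) from if_neg hns,
          tokStep_paren_some _ _ hd (Or.inl rfl),
          show (if '(' = '(' then (1:Int) else -1) = 1 from by decide]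
        rw [ih (t + digitsVal ns * nl) (nl + 1) [], show groupOf [] = none from rfl,
          tok_prefix rest (([] ++ [("n", digitsVal ns)]) ++ [("d", (1:Int))]) none,
          List.foldl_append,
          show (([] ++ [("n", digitsVal ns)]) ++ [("d", (1:Int))] : List (String × Int)).foldl
              sumStep ((0:Int), nl) = (digitsVal ns * nl, nl + 1) from by simp [sumStep],
          sum_shift ((rest.foldl tokStep ([], none)).1) (digitsVal ns * nl) (nl + 1)]
        ring
    · by_cases hcp : c = ')'
      · subst hcp
        have hd : ¬ ('0' ≤ ')' ∧ ')' ≤ '9') := by decide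
        rw [stepA_close]
        by_cases hns : ns = []
        · subst hns
          rw [if_neg (by simp), show groupOf [] = none from rfl,
            tokStep_paren_none _ hd (Or.inr rfl),
            show (if ')' = '(' then (1:Int) else -1) = -1 from by decide]
          rw [ih t (nl - 1) [], show groupOf [] = none from rfl,
            tok_prefix rest ([] ++ [("d", (-1:Int))]) none, List.foldl_append,
            show ([] ++ [("d", (-1:Int))] : List (String × Int)).foldl sumStep ((0:Int), nl)
              = (0, nl - 1) from by simp [sumStep]; constructor,
            sum_shift ((rest.foldl tokStep ([], none)).1) 0 (nl - 1)]
        · rw [if_pos hns, show groupOf ns = some (digitsVal ns) from if_neg hns,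
            tokStep_paren_some _ _ hd (Or.inr rfl),
            show (if ')' = '(' then (1:Int) else -1) = -1 from by decide]
          rw [ih (t + digitsVal ns * nl) (nl - 1) [], show groupOf [] = none from rfl,
            tok_prefix rest (([] ++ [("n", digitsVal ns)]) ++ [("d", (-1:Int))]) none,
            List.foldl_append,
            show (([] ++ [("n", digitsVal ns)]) ++ [("d", (-1:Int))] : List (String × Int)).foldl
                sumStep ((0:Int), nl) = (digitsVal ns * nl, nl - 1) from by
                  simp [sumStep]; constructor,
            sum_shift ((rest.foldl tokStep ([], none)).1) (digitsVal ns * nl) (nl - 1)]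
          ring
      · by_cases hd : 48 ≤ c.toNat ∧ c.toNat ≤ 57
        · have hd' : '0' ≤ c ∧ c ≤ '9' := (digit_test c).mpr hd
          rw [stepA_digit _ _ _ hd, tokStep_digit _ _ hd']
          rw [show some ((groupOf ns).getD 0 * 10 + ((c.toNat : Int) - 48)) = groupOf (ns ++ [c]) from by
            by_cases hns : ns = [] <;> simp [hns, groupOf, digitsVal]]
          exact ih t nl (ns ++ [c])
        · have hd' : ¬ ('0' ≤ c ∧ c ≤ '9') := fun h => hd ((digit_test c).mp h)
          rw [stepA_other _ _ _ hop hcp hd, tokStep_other _ _ hd' (by tauto)]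
          exact ih t nl ns

-- ===== VERDICT (by name: the statement is the Claim_ definition above) =====
theorem score_it_spec : Claim_equal_score_it := by
  intro s _
  unfold Spec_score_it score_it score_it_alt
  have := main_lemma s.toList 0 0 []
  simpa [groupOf] using this
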